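-- pv_equiv track=rewrite | github.com/devbrewai/veritas | apps/api/src/services/sanctions/matcher.py | get_candidates
-- ===== SOURCE A (Python) =====
-- def get_first_token(tokens: list[str]) -> str | None:
--     """Extract first token for blocking."""
--     return tokens[0] if tokens else None
--
-- def get_token_count_bucket(tokens: list[str]) -> str:
--     """
--     Get token count bucket for blocking.
--
--     Groups names by token count to reduce search space.
--
--     Args:
--         tokens: List of name tokens
--
--     Returns:
--         Bucket name: 'single', 'double', 'medium', or 'long'
--     """
--     count = len(tokens)
--     if count == 1:
--         return "single"
--     elif count == 2:
--         return "double"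
--     elif count <= 4:
--         return "medium"
--     else:
--         return "long"
--
-- def get_initials_signature(tokens: list[str]) -> str:
--     """
--     Generate initials signature for blocking.
--
--     Creates a signature from first letters of each token.
--
--     Args:
--         tokens: List of name tokens
--
--     Returns:
--         Initials signature (e.g., "j-d-s" for John David Smith)
--     """
--     if not tokens:
--         return ""
--     initials = [t[0] for t in tokens if len(t) > 0]
--     return "-".join(initials)
--
-- def get_candidates(
--     query_tokens: list[str],
--     first_token_index: dict[str, list[int]],
--     bucket_index: dict[str, list[int]],
--     initials_index: dict[str, list[int]],
-- ) -> tuple[list[int], dict[int, int]]: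
--     """
--     Retrieve candidate indices using multi-strategy blocking.
--
--     Returns candidates with priority scores based on how many
--     blocking strategies they match (higher = more likely to be relevant).
--
--     Args:
--         query_tokens: Tokenized query name
--         first_token_index: Blocking index by first token
--         bucket_index: Blocking index by token count bucket
--         initials_index: Blocking index by initials signature
--
--     Returns:
--         Tuple of (candidate_indices, priority_scores)
--     """
--     candidate_counts: dict[int, int] = {}
--
--     # Strategy 1: First token match (highest priority: +3)
--     first_token = get_first_token(query_tokens)
--     if first_token and first_token in first_token_index:
--         for idx in first_token_index[first_token]:
--             candidate_counts[idx] = candidate_counts.get(idx, 0) + 3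
--
--     # Strategy 2: Token count bucket (lowest priority: +1)
--     bucket = get_token_count_bucket(query_tokens)
--     if bucket in bucket_index:
--         for idx in bucket_index[bucket]:
--             candidate_counts[idx] = candidate_counts.get(idx, 0) + 1
--
--     # Strategy 3: Initials signature (medium priority: +2)
--     initials = get_initials_signature(query_tokens)
--     if initials and initials in initials_index:
--         for idx in initials_index[initials]:
--             candidate_counts[idx] = candidate_counts.get(idx, 0) + 2
--
--     # Sort by priority (candidates appearing in multiple strategies first)
--     candidate_indices = sorted(
--         candidate_counts.keys(),
--         key=lambda x: candidate_counts[x],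
--         reverse=True,
--     )
--
--     return candidate_indices, candidate_counts
-- ===== SOURCE B (Python) =====
-- def get_candidates(
--     query_tokens: list[str],
--     first_token_index: dict[str, list[int]],
--     bucket_index: dict[str, list[int]],
--     initials_index: dict[str, list[int]],
-- ) -> tuple[list[int], dict[int, int]]:
--     # Collect the contributing (id-list, weight) sources, then accumulate them
--     # in one generic loop instead of three specialized ones.
--     sources = []
--     if query_tokens and query_tokens[0] and query_tokens[0] in first_token_index:
--         sources.append((first_token_index[query_tokens[0]], 3))
--     bucket = {0: "medium", 1: "single", 2: "double", 3: "medium", 4: "medium"}.get(len(query_tokens), "long")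
--     if bucket in bucket_index:
--         sources.append((bucket_index[bucket], 1))
--     initials = "-".join(t[0] for t in query_tokens if t)
--     if initials and initials in initials_index:
--         sources.append((initials_index[initials], 2))
--
--     candidate_counts: dict[int, int] = {}
--     for ids, w in sources:
--         for idx in ids:
--             candidate_counts[idx] = candidate_counts.get(idx, 0) + w
--
--     # Group-by-score sweep instead of a full sort: emit, for each distinct
--     # score from highest to lowest, the ids with that score in insertion order.
--     candidate_indices: list[int] = []
--     for score in sorted(set(candidate_counts.values()), reverse=True):
--         for idx, s in candidate_counts.items():
--             if s == score:
--                 candidate_indices.append(idx)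
--
--     return candidate_indices, candidate_counts
-- ===== Notes on version B (the rewrite author's own statement) =====
-- stated objective: alternative
-- what changed: Replaces the final reverse stable sort of the candidates by a descending group-by-score sweep (only the few distinct scores are sorted, each group emitted in insertion order), and merges the three accumulation loops into one generic (ids, weight) loop over the collected sources.
import Mathlib
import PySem

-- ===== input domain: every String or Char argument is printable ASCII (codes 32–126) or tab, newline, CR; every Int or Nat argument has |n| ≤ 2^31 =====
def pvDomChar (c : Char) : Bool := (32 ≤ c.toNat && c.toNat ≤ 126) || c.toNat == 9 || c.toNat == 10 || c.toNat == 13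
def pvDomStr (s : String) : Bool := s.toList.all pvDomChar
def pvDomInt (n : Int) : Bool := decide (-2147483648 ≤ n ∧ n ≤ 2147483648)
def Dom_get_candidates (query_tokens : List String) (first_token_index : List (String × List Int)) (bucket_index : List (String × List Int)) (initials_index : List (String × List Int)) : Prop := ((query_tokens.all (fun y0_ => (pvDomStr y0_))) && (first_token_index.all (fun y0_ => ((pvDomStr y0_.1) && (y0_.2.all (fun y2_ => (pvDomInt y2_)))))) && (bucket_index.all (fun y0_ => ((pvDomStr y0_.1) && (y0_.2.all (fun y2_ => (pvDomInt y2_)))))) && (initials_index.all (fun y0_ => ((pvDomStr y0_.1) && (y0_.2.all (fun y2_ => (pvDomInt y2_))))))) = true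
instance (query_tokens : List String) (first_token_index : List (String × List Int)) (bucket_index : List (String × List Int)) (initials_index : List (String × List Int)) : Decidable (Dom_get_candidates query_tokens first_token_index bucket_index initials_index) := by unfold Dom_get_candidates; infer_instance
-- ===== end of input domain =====

-- B replaces the final reverse sort of the candidates by a descending group-by-score sweep and
-- merges the three accumulation loops into one generic (ids, weight) loop (objective: alternative).

-- ===== PORT A =====
-- get_first_token: tokens[0] if tokens else None
def gcA_first_token (tokens : List String) : Option String :=
  match tokens with
  | [] => none
  | t :: _ => some t

-- get_token_count_bucket: the if/elif chain on len(tokens)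
def gcA_bucket (tokens : List String) : String :=
  let count := tokens.length
  if count = 1 then "single"
  else if count = 2 then "double"
  else if count ≤ 4 then "medium"
  else "long"

-- get_initials_signature: "-".join(t[0] for t in tokens if len(t) > 0)
-- (t[0], a one-char string, ported as String.ofList of the pyGet? char; pyGet? is some since len(t) > 0)
def gcA_initials (tokens : List String) : String :=
  if tokens = [] then ""
  else PySem.Str.join "-"
    ((tokens.filter (fun t => decide (0 < PySem.Str.len t))).map
      (fun t => String.ofList (PySem.Str.pyGet? t 0).toList))

def get_candidates (query_tokens : List String) (first_token_index : List (String × List Int)) (bucket_index : List (String × List Int)) (initials_index : List (String × List Int)) : List Int × (List (Int × Int)) :=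
  let ftiD : PySem.Dict String (List Int) := PySem.Dict.mk first_token_index
  let biD : PySem.Dict String (List Int) := PySem.Dict.mk bucket_index
  let iiD : PySem.Dict String (List Int) := PySem.Dict.mk initials_index
  let cc0 : PySem.Dict Int Int := PySem.Dict.empty
  -- Strategy 1: first token (+3); 'if first_token and first_token in first_token_index'
  let cc1 := match gcA_first_token query_tokens with
    | none => cc0
    | some t =>
      if t ≠ "" ∧ ftiD.contains t then
        (ftiD.getD t []).foldl (fun d idx => d.insert idx (d.getD idx 0 + 3)) cc0
      else cc0
  -- Strategy 2: bucket (+1)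
  let bucket := gcA_bucket query_tokens
  let cc2 := if biD.contains bucket then
      (biD.getD bucket []).foldl (fun d idx => d.insert idx (d.getD idx 0 + 1)) cc1
    else cc1
  -- Strategy 3: initials (+2)
  let initials := gcA_initials query_tokens
  let cc3 := if initials ≠ "" ∧ iiD.contains initials then
      (iiD.getD initials []).foldl (fun d idx => d.insert idx (d.getD idx 0 + 2)) cc2
    else cc2
  -- sorted(keys, key=lambda x: candidate_counts[x], reverse=True)
  -- (candidate_counts[x] ported as getD _ x 0: x is always a key of the dict here)
  let candidate_indices := PySem.List.sorted cc3.keys (fun x => cc3.getD x 0) true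
  (candidate_indices, cc3.items)

-- ===== PORT B =====
-- bucket via the table {0..4}.get(len(query_tokens), "long")
def gcB_bucket (tokens : List String) : String :=
  (PySem.Dict.mk [((0:Int), "medium"), (1, "single"), (2, "double"), (3, "medium"), (4, "medium")]).getD
    (tokens.length : Int) "long"

-- "-".join(t[0] for t in query_tokens if t)
def gcB_initials (tokens : List String) : String :=
  PySem.Str.join "-"
    ((tokens.filter (fun t => t ≠ "")).map (fun t => String.ofList (PySem.Str.pyGet? t 0).toList))

def get_candidates_alt (query_tokens : List String) (first_token_index : List (String × List Int)) (bucket_index : List (String × List Int)) (initials_index : List (String × List Int)) : List Int × (List (Int × Int)) :=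
  let ftiD : PySem.Dict String (List Int) := PySem.Dict.mk first_token_index
  let biD : PySem.Dict String (List Int) := PySem.Dict.mk bucket_index
  let iiD : PySem.Dict String (List Int) := PySem.Dict.mk initials_index
  -- collect the contributing (ids, weight) sources
  let s0 : List (List Int × Int) := []
  let s1 := match query_tokens with
    | [] => s0
    | t :: _ => if t ≠ "" ∧ ftiD.contains t then s0 ++ [(ftiD.getD t [], 3)] else s0
  let bucket := gcB_bucket query_tokens
  let s2 := if biD.contains bucket then s1 ++ [(biD.getD bucket [], 1)] else s1
  let initials := gcB_initials query_tokens
  let s3 := if initials ≠ "" ∧ iiD.contains initials then s2 ++ [(iiD.getD initials [], 2)] else s2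
  -- one generic accumulation loop
  let cc := s3.foldl (fun d p => p.1.foldl (fun d idx => d.insert idx (d.getD idx 0 + p.2)) d) PySem.Dict.empty
  -- group-by-score sweep, highest score first
  let scores := PySem.List.sorted (PySem.Set.ofList cc.values) (fun v => v) true
  let candidate_indices := scores.foldl
    (fun acc sc => cc.items.foldl (fun acc p => if p.2 == sc then acc ++ [p.1] else acc) acc) []
  (candidate_indices, cc.items)

-- ===== PRECONDITION & SPEC =====
def Spec_get_candidates (query_tokens : List String) (first_token_index : List (String × List Int)) (bucket_index : List (String × List Int)) (initials_index : List (String × List Int)) (out : List Int × (List (Int × Int))) : Prop := out = get_candidates_alt query_tokens first_token_index bucket_index initials_index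
instance (query_tokens : List String) (first_token_index : List (String × List Int)) (bucket_index : List (String × List Int)) (initials_index : List (String × List Int)) (out : List Int × (List (Int × Int))) : Decidable (Spec_get_candidates query_tokens first_token_index bucket_index initials_index out) := by unfold Spec_get_candidates; infer_instance

-- ===== CLAIM (what is proved, stated in full; the proofs are below) =====
def Claim_equal_get_candidates : Prop := ∀ (query_tokens : List String) (first_token_index : List (String × List Int)) (bucket_index : List (String × List Int)) (initials_index : List (String × List Int)), Dom_get_candidates query_tokens first_token_index bucket_index initials_index → Spec_get_candidates query_tokens first_token_index bucket_index initials_index (get_candidates query_tokens first_token_index bucket_index initials_index)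

-- ===== LEMMAS AND PROOFS =====

-- the two bucket computations agree
lemma gc_bucket_eq (tokens : List String) : gcA_bucket tokens = gcB_bucket tokens := by
  unfold gcA_bucket gcB_bucket
  match tokens with
  | [] => decide
  | [_] => rfl
  | [_, _] => rfl
  | [_, _, _] => rfl
  | [_, _, _, _] => rfl
  | _ :: _ :: _ :: _ :: _ :: rest =>
    simp only [List.length_cons]
    rw [PySem.Dict.getD_eq_get?_getD]
    have hg : PySem.Dict.get? (PySem.Dict.mk [((0:Int), "medium"), (1, "single"), (2, "double"),
        (3, "medium"), (4, "medium")]) ((rest.length + 1 + 1 + 1 + 1 + 1 : Nat) : Int) = none := by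
      simp only [PySem.Dict.get?_mk_cons]
      split_ifs with h1 h2 h3 h4 h5 <;>
        first
        | rfl
        | (exfalso; simp only [beq_iff_eq] at *; omega)
    rw [hg]
    have : ¬ (rest.length + 1 + 1 + 1 + 1 + 1 ≤ 4) := by omega
    simp [this]

-- the two initials computations agree
lemma gc_initials_eq (tokens : List String) : gcA_initials tokens = gcB_initials tokens := by
  unfold gcA_initials gcB_initials
  cases tokens with
  | nil => rfl
  | cons t rest =>
    simp only [if_neg (List.cons_ne_nil t rest)]
    congr 2
    apply List.filter_congr
    intro x _
    simp only [decide_eq_decide]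
    rw [PySem.Str.len_eq]
    constructor
    · intro h hx; rw [hx] at h; simp at h
    · intro h
      have : x.toList ≠ [] := fun hn => h (by
        have := congrArg String.ofList hn
        simpa using this)
      have : 0 < x.toList.length := List.length_pos_iff.mpr this
      exact_mod_cast this

-- insertBy walks past a prefix it never inserts before
lemma insertBy_append_not_before {α : Type} (before : α → α → Bool) (x : α) (A B : List α)
    (h : ∀ a ∈ A, before x a = false) :
    PySem.List.insertBy before x (A ++ B) = A ++ PySem.List.insertBy before x B := by
  induction A with
  | nil => rfl
  | cons a t ih =>
    have ha : before x a = false := h a (by simp)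
    have step : PySem.List.insertBy before x (a :: (t ++ B)) = a :: PySem.List.insertBy before x (t ++ B) := by
      simp [PySem.List.insertBy, ha]
    simp only [List.cons_append, step, ih (fun b hb => h b (by simp [hb]))]

-- inserting one element into the grouped concatenation appends it to its own group
lemma insertBy_grouped_step {α : Type} (f : α → Int) (x : α) (p : List α) (vs : List Int)
    (hvs : vs.Pairwise (fun a b => b < a)) (hx : f x ∈ vs) :
    PySem.List.insertBy (fun a b => decide (f b < f a)) x
        (vs.flatMap (fun v => p.filter (fun y => f y == v)))
      = vs.flatMap (fun v => (p ++ [x]).filter (fun y => f y == v)) := by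
  obtain ⟨hi, lo, rfl⟩ := List.append_of_mem hx
  rw [List.pairwise_append] at hvs
  obtain ⟨hhi, hlo', hcross⟩ := hvs
  have hgt : ∀ v ∈ hi, f x < v := fun v hv => hcross v hv (f x) (by simp)
  have hlt : ∀ v ∈ lo, v < f x := (List.pairwise_cons.mp hlo').1
  have hmemf : ∀ {v : Int} {a : α}, a ∈ p.filter (fun y => f y == v) → f a = v := by
    intro v a ha
    exact beq_iff_eq.mp (List.mem_filter.mp ha).2
  -- the group-of-x part of the RHS
  have hfil : ∀ v : Int, (p ++ [x]).filter (fun y => f y == v)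
      = p.filter (fun y => f y == v) ++ (if f x == v then [x] else []) := by
    intro v
    rw [List.filter_append]
    congr 1
    by_cases hxv : f x = v <;> simp [hxv]
  have hhiF : hi.flatMap (fun v => (p ++ [x]).filter (fun y => f y == v))
      = hi.flatMap (fun v => p.filter (fun y => f y == v)) := by
    apply List.flatMap_congr
    intro v hv
    rw [hfil v, if_neg (by simp; exact fun h => absurd h (ne_of_lt (hgt v hv)))]
    simp
  have hloF : lo.flatMap (fun v => (p ++ [x]).filter (fun y => f y == v))
      = lo.flatMap (fun v => p.filter (fun y => f y == v)) := by
    apply List.flatMap_congr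
    intro v hv
    rw [hfil v, if_neg (by simp; exact fun h => absurd h (ne_of_gt (hlt v hv)))]
    simp
  rw [List.flatMap_append, List.flatMap_append, List.flatMap_cons, List.flatMap_cons,
    hhiF, hloF, hfil (f x), if_pos (by simp)]
  rw [← List.append_assoc]
  rw [insertBy_append_not_before _ x
      (hi.flatMap (fun v => p.filter (fun y => f y == v)) ++ p.filter (fun y => f y == f x)) _
      (by
        intro a ha
        rcases List.mem_append.mp ha with h | h
        · obtain ⟨v, hv, hav⟩ := List.mem_flatMap.mp h
          have := hmemf hav
          simp [this]
          exact le_of_lt (hgt v hv)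
        · have := hmemf h
          simp [this])]
  have hins : PySem.List.insertBy (fun a b => decide (f b < f a)) x
      (lo.flatMap (fun v => p.filter (fun y => f y == v)))
      = x :: lo.flatMap (fun v => p.filter (fun y => f y == v)) := by
    cases hB : lo.flatMap (fun v => p.filter (fun y => f y == v)) with
    | nil => rfl
    | cons b u =>
      have hb : b ∈ lo.flatMap (fun v => p.filter (fun y => f y == v)) := by rw [hB]; simp
      obtain ⟨v, hv, hbv⟩ := List.mem_flatMap.mp hb
      have hfb : f b = v := hmemf hbv
      have : f b < f x := hfb ▸ hlt v hv
      simp [PySem.List.insertBy, this]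
  rw [hins]
  simp

-- a stable reverse sort is the concatenation, over any strictly descending list of
-- values covering all keys, of the groups in original order
lemma sorted_rev_eq_flatMap_filter {α : Type} (f : α → Int) (xs : List α) (vs : List Int)
    (hvs : vs.Pairwise (fun a b => b < a)) (hc : ∀ x ∈ xs, f x ∈ vs) :
    PySem.List.sorted xs f true = vs.flatMap (fun v => xs.filter (fun y => f y == v)) := by
  rw [PySem.List.sorted_rev_eq_foldl_insertBy]
  suffices h : ∀ (rest p : List α), (∀ x ∈ rest, f x ∈ vs) →
      rest.foldl (fun acc x => PySem.List.insertBy (fun a b => decide (f b < f a)) x acc)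
        (vs.flatMap (fun v => p.filter (fun y => f y == v)))
      = vs.flatMap (fun v => (p ++ rest).filter (fun y => f y == v)) by
    have h0 : vs.flatMap (fun v => ([] : List α).filter (fun y => f y == v)) = [] := by
      induction vs <;> simp_all
    have := h xs [] hc
    rw [h0] at this
    simpa using this
  intro rest
  induction rest with
  | nil => intro p _; simp
  | cons x r ih =>
    intro p hmem
    rw [List.foldl_cons, insertBy_grouped_step f x p vs hvs (hmem x (by simp)),
      ih (p ++ [x]) (fun y hy => hmem y (by simp [hy]))]
    simp

-- getD of a key is one of the values
lemma getD_mem_values (cc : PySem.Dict Int Int) (x : Int) (hx : x ∈ cc.keys) :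
    cc.getD x 0 ∈ cc.values := by
  have hcont : cc.contains x = true := (PySem.Dict.contains_iff_mem_keys cc x).mpr hx
  rw [PySem.Dict.contains_eq_isSome_get?] at hcont
  obtain ⟨v, hv⟩ := Option.isSome_iff_exists.mp hcont
  rw [PySem.Dict.getD_of_get?_eq_some cc 0 hv]
  have := PySem.Dict.mem_items_of_get?_eq_some cc hv
  simp only [PySem.Dict.values]
  exact List.mem_map.mpr ⟨(x, v), this, rfl⟩

-- the sorted output of A equals the group-by-score sweep of B (for a dict with unique keys)
lemma sorted_part (cc : PySem.Dict Int Int) (h : cc.keys.Nodup) :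
    PySem.List.sorted cc.keys (fun x => cc.getD x 0) true
      = (PySem.List.sorted (PySem.Set.ofList cc.values) (fun v => v) true).foldl
          (fun acc sc => cc.items.foldl (fun acc p => if p.2 == sc then acc ++ [p.1] else acc) acc) [] := by
  have hperm : (PySem.List.sorted (PySem.Set.ofList cc.values) (fun v => v) true).Perm
      (PySem.Set.ofList cc.values) := PySem.List.sorted_perm _ _ _
  have hnd : (PySem.List.sorted (PySem.Set.ofList cc.values) (fun v => v) true).Nodup :=
    hperm.nodup_iff.mpr (PySem.Set.nodup_ofList _)
  have hge : (PySem.List.sorted (PySem.Set.ofList cc.values) (fun v => v) true).Pairwise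
      (fun a b => b ≤ a) := PySem.List.sorted_pairwise_rev _ _
  have hgt : (PySem.List.sorted (PySem.Set.ofList cc.values) (fun v => v) true).Pairwise
      (fun a b => b < a) := by
    have := hge.and (List.nodup_iff_pairwise_ne.mp hnd)
    exact this.imp (fun hab => lt_of_le_of_ne hab.1 (Ne.symm hab.2))
  have hcov : ∀ x ∈ cc.keys, cc.getD x 0 ∈
      PySem.List.sorted (PySem.Set.ofList cc.values) (fun v => v) true := by
    intro x hx
    rw [PySem.List.mem_sorted]
    exact (PySem.Set.mem_ofList _ _).mpr (getD_mem_values cc x hx)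
  rw [sorted_rev_eq_flatMap_filter (fun x => cc.getD x 0) cc.keys _ hgt hcov]
  simp only [PySem.List.foldl_append_if, PySem.List.foldl_append_eq_flatMap]
  rw [List.nil_append]
  apply List.flatMap_congr
  intro v _
  rw [PySem.Dict.items_eq_map_keys cc h 0]
  simp [List.filter_map, List.map_map, Function.comp_def]

theorem get_candidates_spec : Claim_equal_get_candidates := by
  intro qt fti bi ii _
  unfold Spec_get_candidates get_candidates get_candidates_alt
  rw [← gc_bucket_eq, ← gc_initials_eq]
  cases qt with
  | nil =>
    simp only [gcA_first_token]
    split_ifs <;>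
      (dsimp only [List.foldl_cons, List.foldl_nil, List.nil_append, List.cons_append]
       exact congrArg₂ Prod.mk
        (sorted_part _ (by repeat (first | exact PySem.Dict.nodup_keys_empty | apply PySem.Dict.nodup_keys_foldl_insert))) rfl)
  | cons t rest =>
    simp only [gcA_first_token]
    split_ifs <;>
      (dsimp only [List.foldl_cons, List.foldl_nil, List.nil_append, List.cons_append]
       exact congrArg₂ Prod.mk
        (sorted_part _ (by repeat (first | exact PySem.Dict.nodup_keys_empty | apply PySem.Dict.nodup_keys_foldl_insert))) rfl)
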